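-- pv_equiv track=rewrite | github.com/AdvaitDeshmukh0120/commando-whatsapp-bot | rag_chain.py | has_pronoun
-- ===== SOURCE A (Python) =====
-- PRONOUN_WORDS = {"it", "this", "that", "these", "them", "those", "its"}
--
-- def has_pronoun(message):
--     msg_lower = message.lower()
--     words = msg_lower.split()
--     for word in words:
--         clean = word.strip(",.?!:;'\"()[]")
--         if clean in PRONOUN_WORDS:
--             if any(q in msg_lower for q in [
--                 "what", "how", "does", "is", "are", "can", "which", "tell",
--                 "about", "available", "models", "specs", "features", "support",
--                 "compare", "difference", "price", "cost", "warranty",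
--                 "in it", "of it", "for it", "about it", "about this",
--                 "about that", "in this", "in that", "of this", "of that"
--             ]):
--                 return True
--     return False
-- ===== SOURCE B (Python) =====
-- PRONOUN_WORDS = {"it", "this", "that", "these", "them", "those", "its"}
--
-- STRIP_CHARS = set(",.?!:;'\"()[]")
--
-- KEYWORDS = [
--     "what", "how", "does", "is", "are", "can", "which", "tell",
--     "about", "available", "models", "specs", "features", "support",
--     "compare", "difference", "price", "cost", "warranty",
--     "in it", "of it", "for it", "about it", "about this",
--     "about that", "in this", "in that", "of this", "of that"
-- ]
--
--
-- def has_pronoun(message):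
--     s = message.lower()
--     # Single hand-rolled character scan: an explicit tokenizer state machine
--     # (current token accumulator, flushed on whitespace; a sentinel space
--     # flushes the last token), trimming punctuation at flush time.
--     has_pron = False
--     token = []
--     for ch in s + " ":
--         if ch.isspace():
--             if token:
--                 while token and token[0] in STRIP_CHARS:
--                     token = token[1:]
--                 while token and token[-1] in STRIP_CHARS:
--                     token = token[:-1]
--                 if "".join(token) in PRONOUN_WORDS:
--                     has_pron = True
--                 token = []
--         else:
--             token.append(ch)
--     if not has_pron:
--         return False
--     for q in KEYWORDS:
--         if q in s:
--             return True
--     return False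
-- ===== Notes on version B (the rewrite author's own statement) =====
-- stated objective: alternative
-- what changed: Replaces A's split/strip/nested-any structure with a single hand-rolled character-level tokenizer state machine (explicit token accumulator flushed on whitespace, punctuation trimmed by index loops at flush time) followed by a separate early-exit keyword loop.
import Mathlib
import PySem

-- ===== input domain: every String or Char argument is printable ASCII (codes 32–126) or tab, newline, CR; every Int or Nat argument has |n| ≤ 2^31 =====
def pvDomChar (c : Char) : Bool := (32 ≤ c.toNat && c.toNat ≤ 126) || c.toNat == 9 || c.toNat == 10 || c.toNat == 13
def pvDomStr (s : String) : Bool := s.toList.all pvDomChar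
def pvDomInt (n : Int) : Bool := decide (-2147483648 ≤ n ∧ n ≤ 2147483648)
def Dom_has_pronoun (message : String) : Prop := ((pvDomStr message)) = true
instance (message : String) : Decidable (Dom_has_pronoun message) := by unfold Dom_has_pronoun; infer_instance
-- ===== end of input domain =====

-- B replaces A's split/strip/nested-any by a single character-level tokenizer state
-- machine (explicit accumulator, flush-time trimming) plus a staged early-exit keyword loop.


def pronounWords : List String := ["it", "this", "that", "these", "them", "those", "its"]

def keywordList : List String :=
  ["what", "how", "does", "is", "are", "can", "which", "tell",
   "about", "available", "models", "specs", "features", "support",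
   "compare", "difference", "price", "cost", "warranty",
   "in it", "of it", "for it", "about it", "about this",
   "about that", "in this", "in that", "of this", "of that"]

def stripStr : String := ",.?!:;'\"()[]"

-- ===== PORT A =====
-- A's for-loop with early return, as structural recursion over the word list.
def hasPronounLoop (msgLower : String) : List String → Bool
  | [] => false
  | w :: rest =>
      if pronounWords.contains (PySem.Str.stripChars w stripStr) then
        if keywordList.any (fun q => PySem.Str.isIn q msgLower) then true
        else hasPronounLoop msgLower rest
      else hasPronounLoop msgLower rest

def has_pronoun (message : String) : Bool :=
  let msgLower := PySem.Str.lower message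
  let words := PySem.Str.split₀ msgLower
  hasPronounLoop msgLower words

-- ===== PORT B =====
def stripSet : List Char := (",.?!:;'\"()[]").toList

-- port of Source B's first trimming while-loop (drop leading strip chars)
def trimFront : List Char → List Char
  | [] => []
  | c :: cs => if stripSet.contains c then trimFront cs else c :: cs

-- port of Source B's second trimming while-loop (pop trailing strip chars)
def trimBack : List Char → List Char
  | [] => []
  | c :: cs =>
      match trimBack cs with
      | [] => if stripSet.contains c then [] else [c]
      | r => c :: r

-- port of Source B's character scan: state = (current token accumulator, has_pron flag)
def scanTok : List Char → List Char → Bool → Bool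
  | [], _, b => b
  | c :: cs, token, b =>
      if PySem.Chars.isspace c then
        if token.isEmpty then scanTok cs [] b
        else
          scanTok cs []
            (b || pronounWords.contains (String.ofList (trimBack (trimFront token))))
      else scanTok cs (token ++ [c]) b

-- port of Source B's final keyword loop with early return
def kwLoop : List String → String → Bool
  | [], _ => false
  | q :: qs, s => if PySem.Str.isIn q s then true else kwLoop qs s

def has_pronoun_alt (message : String) : Bool :=
  let s := PySem.Str.lower message
  let hasPron := scanTok (s.toList ++ [' ']) [] false
  if !hasPron then false else kwLoop keywordList s

-- ===== PRECONDITION & SPEC =====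
def Spec_has_pronoun (message : String) (out : Bool) : Prop := out = has_pronoun_alt message
instance (message : String) (out : Bool) : Decidable (Spec_has_pronoun message out) := by unfold Spec_has_pronoun; infer_instance

-- ===== CLAIM =====
def Claim_equal_has_pronoun : Prop := ∀ (message : String), Dom_has_pronoun message → Spec_has_pronoun message (has_pronoun message)

-- ===== LEMMAS AND PROOFS =====

theorem hasPronounLoop_eq (msgLower : String) (ws : List String) :
    hasPronounLoop msgLower ws =
      (ws.any (fun w => pronounWords.contains (PySem.Str.stripChars w stripStr)) &&
        keywordList.any (fun q => PySem.Str.isIn q msgLower)) := by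
  induction ws with
  | nil => rfl
  | cons w rest ih =>
      rw [hasPronounLoop, ih, List.any_cons]
      by_cases hp : pronounWords.contains (PySem.Str.stripChars w stripStr) = true
      · rw [if_pos hp, hp]
        cases hk : keywordList.any (fun q => PySem.Str.isIn q msgLower) <;> simp
      · rw [if_neg hp]
        simp only [Bool.not_eq_true] at hp
        rw [hp]
        simp

theorem kwLoop_eq (qs : List String) (s : String) :
    kwLoop qs s = qs.any (fun q => PySem.Str.isIn q s) := by
  induction qs with
  | nil => rfl
  | cons q rest ih =>
      rw [kwLoop, List.any_cons]
      by_cases h : PySem.Str.isIn q s = true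
      · rw [if_pos h, h]; simp
      · rw [if_neg h]; simp only [Bool.not_eq_true] at h; rw [h, ih]; simp

theorem trimFront_eq (t : List Char) :
    trimFront t = t.dropWhile (fun c => stripSet.contains c) := by
  induction t with
  | nil => rfl
  | cons c cs ih =>
      rw [trimFront, List.dropWhile_cons]
      split_ifs with h <;> simp_all

theorem trimBack_eq (t : List Char) :
    trimBack t = (t.reverse.dropWhile (fun c => stripSet.contains c)).reverse := by
  induction t with
  | nil => rfl
  | cons c cs ih =>
      rw [trimBack, List.reverse_cons, List.dropWhile_append]
      cases hr : trimBack cs with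
      | nil =>
          have h0 : List.dropWhile (fun c => stripSet.contains c) cs.reverse = [] :=
            List.reverse_eq_nil_iff.mp (ih.symm.trans hr)
          rw [h0]
          simp [List.dropWhile_cons]
          split_ifs <;> simp
      | cons r rs =>
          have h0 : List.dropWhile (fun c => stripSet.contains c) cs.reverse ≠ [] := by
            intro h
            rw [ih, h] at hr
            simp at hr
          have hie : ¬ ((List.dropWhile (fun c => stripSet.contains c) cs.reverse).isEmpty = true) :=
            fun h => h0 (List.isEmpty_iff.mp h)
          rw [if_neg hie, List.reverse_append, ← ih, hr]
          rfl

-- the clean token B computes is exactly Python strip(",.?!:;'\"()[]")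
theorem trim_eq_stripChars (t : List Char) :
    trimBack (trimFront t) = PySem.Chars.stripChars t stripStr.toList := by
  rw [trimFront_eq, trimBack_eq, PySem.Chars.stripChars]
  rfl

-- split₀.go with a nonempty accumulator just prepends the flushed tokens
theorem split₀_go_acc (cs : List Char) (cur : List Char) (acc : List (List Char)) :
    PySem.Chars.split₀.go cs cur acc = acc.reverse ++ PySem.Chars.split₀.go cs cur [] := by
  induction cs generalizing cur acc with
  | nil =>
      rw [PySem.Chars.split₀.go, PySem.Chars.split₀.go]
      split_ifs <;> simp
  | cons c rest ih =>
      rw [PySem.Chars.split₀.go]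
      conv_rhs => rw [PySem.Chars.split₀.go]
      by_cases hs : PySem.Chars.isspace c = true
      · rw [if_pos hs, if_pos hs]
        by_cases he : cur.isEmpty = true
        · rw [if_pos he, if_pos he, ih]
        · rw [if_neg he, if_neg he, ih [] (cur.reverse :: acc), ih [] [cur.reverse]]
          simp
      · rw [if_neg hs, if_neg hs, ih]

-- B's scanner (with the sentinel space) decides "some token strips to a pronoun"
theorem scanTok_eq (cs : List Char) (token : List Char) (b : Bool) :
    scanTok (cs ++ [' ']) token b =
      (b || (PySem.Chars.split₀.go cs token.reverse []).any
        (fun t => pronounWords.contains (String.ofList (trimBack (trimFront t))))) := by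
  induction cs generalizing token b with
  | nil =>
      rw [List.nil_append, scanTok, PySem.Chars.split₀.go]
      have hsp : PySem.Chars.isspace ' ' = true := by decide
      rw [if_pos hsp]
      cases token with
      | nil => simp [scanTok]
      | cons t ts =>
          have hif2 : ((t :: ts).reverse).isEmpty = false := by simp
          rw [hif2]
          simp [scanTok]
  | cons c rest ih =>
      rw [List.cons_append, scanTok, PySem.Chars.split₀.go]
      by_cases hs : PySem.Chars.isspace c = true
      · rw [if_pos hs, if_pos hs]
        cases token with
        | nil => simpa using ih [] b
        | cons t ts =>
            have hif2 : ((t :: ts).reverse).isEmpty = false := by simp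
            rw [hif2]
            simp only [List.isEmpty_cons, if_false, Bool.false_eq_true]
            rw [ih [] _, split₀_go_acc rest [] [(t :: ts).reverse.reverse]]
            simp [Bool.or_assoc]
      · rw [if_neg hs, if_neg hs, ih (token ++ [c]) b]
        simp

-- ===== VERDICT =====
theorem has_pronoun_spec : Claim_equal_has_pronoun := by
  intro message _
  unfold Spec_has_pronoun has_pronoun has_pronoun_alt
  rw [hasPronounLoop_eq]
  simp only [kwLoop_eq, scanTok_eq, Bool.false_or, List.reverse_nil]
  have hany : (PySem.Str.split₀ (PySem.Str.lower message)).any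
      (fun w => pronounWords.contains (PySem.Str.stripChars w stripStr)) =
      (PySem.Chars.split₀.go (PySem.Str.lower message).toList [] []).any
        (fun t => pronounWords.contains (String.ofList (trimBack (trimFront t)))) := by
    rw [PySem.Str.split₀, List.any_map]
    refine List.any_congr rfl ?_
    intro t
    rw [trim_eq_stripChars]
    simp [PySem.Str.stripChars]
  rw [hany]
  generalize (PySem.Chars.split₀.go (PySem.Str.lower message).toList [] []).any
      (fun t => pronounWords.contains (String.ofList (trimBack (trimFront t)))) = x
  cases x <;> simp
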